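-- pv_equiv track=rewrite | github.com/Jung-H-C/Time-Series-Library | data_provider/data_loader.py | _resolve_column_name
-- ===== SOURCE A (Python) =====
-- def _resolve_column_name(columns, aliases, description, required=True):
--     lowered = {str(col).lower(): col for col in columns}
--     for alias in aliases:
--         if alias.lower() in lowered:
--             return lowered[alias.lower()]
--     if required:
--         raise ValueError(
--             f"Missing required Dominick column for {description}. "
--             f"Tried aliases: {aliases}"
--         )
--     return None
-- ===== SOURCE B (Python) =====
-- def _resolve_column_name(columns, aliases, description, required=True):
--     priority = {}
--     for i, alias in enumerate(aliases):
--         priority.setdefault(alias.lower(), i)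
--     best = None  # (alias priority, column)
--     for col in columns:
--         rank = priority.get(str(col).lower())
--         if rank is None:
--             continue
--         if best is None or rank < best[0]:
--             best = (rank, col)
--     if best is not None:
--         return best[1]
--     if required:
--         raise ValueError(
--             f"Missing required Dominick column for {description}. "
--             f"Tried aliases: {aliases}"
--         )
--     return None
-- ===== Notes on version B (the rewrite author's own statement) =====
-- stated objective: alternative
-- what changed: B inverts the lookup direction: it builds a first-occurrence alias->priority dict and makes one pass over the columns keeping the column with the smallest alias priority, instead of A's column-keyed lowercase dict scanned alias by alias; Pre_ excludes the inputs where A raises ValueError (required with no case-insensitive match) and column lists where two DISTINCT column strings share a lowercase name matching an alias, on which A's last-column answer is an accident of dict overwrite while B keeps the first such column.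
-- outside the precondition, e.g. on _resolve_column_name(['A', 'a'], ['a'], 'd', False): A returns 'a', B returns 'A'; on _resolve_column_name(['x'], ['y'], 'd', True): A raises ValueError, B raises ValueError
import Mathlib
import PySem

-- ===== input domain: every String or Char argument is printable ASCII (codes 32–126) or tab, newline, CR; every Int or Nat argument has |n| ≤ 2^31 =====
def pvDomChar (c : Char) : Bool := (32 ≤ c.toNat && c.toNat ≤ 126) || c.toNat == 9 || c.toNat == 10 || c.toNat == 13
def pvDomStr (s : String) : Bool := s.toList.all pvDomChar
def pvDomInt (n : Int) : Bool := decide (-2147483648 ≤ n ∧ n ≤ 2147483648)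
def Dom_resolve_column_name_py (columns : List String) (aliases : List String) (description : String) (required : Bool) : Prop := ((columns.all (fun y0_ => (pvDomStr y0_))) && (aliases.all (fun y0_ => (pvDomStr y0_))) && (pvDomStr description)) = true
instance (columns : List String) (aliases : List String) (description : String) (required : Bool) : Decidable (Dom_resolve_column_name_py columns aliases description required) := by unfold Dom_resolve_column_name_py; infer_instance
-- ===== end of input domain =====

-- B resolves the column in one linear pass over the columns, keeping the column whose
-- lowercase name has the smallest index (highest priority) in a first-occurrence
-- alias-priority dict, instead of A's column-keyed lowercase dict scanned alias by alias
-- (objective: alternative algorithm, same asymptotic cost).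


-- ===== PORT A =====
-- 'for alias in aliases: if alias.lower() in lowered: return lowered[alias.lower()]'
def pvA_loop (lowered : PySem.Dict String String) : List String → Option String
  | [] => none
  | a :: rest =>
    match lowered.get? (PySem.Str.lower a) with
    | some v => some v
    | none => pvA_loop lowered rest

def resolve_column_name_py (columns : List String) (aliases : List String) (description : String) (required : Bool) : Option String :=
  let lowered := columns.foldl (fun d col => d.insert (PySem.Str.lower col) col) PySem.Dict.empty
  match pvA_loop lowered aliases with
  | some v => some v
  | none => if required then none  -- Python raises ValueError here (excluded by Pre_)
            else none

-- ===== PORT B =====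
-- 'priority = {}; for i, alias in enumerate(aliases): priority.setdefault(alias.lower(), i)'
def pvB_priority (aliases : List String) : PySem.Dict String Int :=
  (PySem.List.enumerate aliases 0).foldl
    (fun d p => d.setdefault (PySem.Str.lower p.2) p.1) PySem.Dict.empty

-- one iteration of Source B's column loop: 'rank = priority.get(str(col).lower());
-- if rank is None: continue; if best is None or rank < best[0]: best = (rank, col)'
def pvB_step (priority : PySem.Dict String Int) (best : Option (Int × String)) (col : String) : Option (Int × String) :=
  match priority.get? (PySem.Str.lower col) with
  | none => best  -- continue
  | some rank =>
    match best with
    | none => some (rank, col)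
    | some (br, bc) => if rank < br then some (rank, col) else some (br, bc)

def resolve_column_name_py_alt (columns : List String) (aliases : List String) (description : String) (required : Bool) : Option String :=
  let priority := pvB_priority aliases
  match columns.foldl (pvB_step priority) none with
  | some (_, c) => some c
  | none => if required then none  -- Python raises ValueError here (excluded by Pre_)
            else none

-- ===== PRECONDITION & SPEC =====
-- Pre_ excludes (a) the inputs where A (and B) raise ValueError: required=true with no
-- case-insensitive match, and (b) column lists in which two DISTINCT column strings share
-- a lowercase name that matches some alias: there A's answer (the LAST such column) is an
-- accident of dict overwrite on duplicate keys, while B keeps the FIRST such column.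
def Pre_resolve_column_name_py (columns : List String) (aliases : List String) (description : String) (required : Bool) : Prop :=
  (required = true → ∃ a ∈ aliases, ∃ c ∈ columns, PySem.Str.lower c = PySem.Str.lower a) ∧
  List.Pairwise (fun c1 c2 => PySem.Str.lower c1 = PySem.Str.lower c2 → c1 ≠ c2 →
      PySem.Str.lower c1 ∉ aliases.map PySem.Str.lower) columns
instance (columns : List String) (aliases : List String) (description : String) (required : Bool) : Decidable (Pre_resolve_column_name_py columns aliases description required) := by unfold Pre_resolve_column_name_py; infer_instance

def pvWitness_resolve_column_name_py : List String × List String × String × Bool := (["Price", "Qty"], ["PRICE"], "price column", true)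

def Spec_resolve_column_name_py (columns : List String) (aliases : List String) (description : String) (required : Bool) (out : Option String) : Prop := out = resolve_column_name_py_alt columns aliases description required
instance (columns : List String) (aliases : List String) (description : String) (required : Bool) (out : Option String) : Decidable (Spec_resolve_column_name_py columns aliases description required out) := by unfold Spec_resolve_column_name_py; infer_instance

-- ===== CLAIM (what is proved, stated in full; the proofs are below) =====
def Claim_equal_resolve_column_name_py : Prop := ∀ (columns : List String) (aliases : List String) (description : String) (required : Bool), Dom_resolve_column_name_py columns aliases description required → Pre_resolve_column_name_py columns aliases description required → Spec_resolve_column_name_py columns aliases description required (resolve_column_name_py columns aliases description required)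

-- ===== LEMMAS AND PROOFS =====

-- the last column whose lowercase equals k (what A's dict answers for key k)
def pvLastM (columns : List String) (k : String) : Option String :=
  columns.foldl (fun acc c => if PySem.Str.lower c = k then some c else acc) none

-- reference loop over the lowered-alias list, taking the FIRST matching column
def pvF_loop (columns : List String) : List String → Option String
  | [] => none
  | t :: rest =>
    match columns.find? (fun c => PySem.Str.lower c == t) with
    | some v => some v
    | none => pvF_loop columns rest

-- proof-side reference fold: B's column loop with the rank looked up in the lowered
-- alias list instead of the priority dict
def pvB_stepNat (targets : List String) (best : Option (Nat × String)) (col : String) : Option (Nat × String) :=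
  match PySem.List.index? targets (PySem.Str.lower col) with
  | none => best
  | some rank =>
    match best with
    | none => some (rank, col)
    | some (br, bc) => if rank < br then some (rank, col) else some (br, bc)

-- A's dict built by inserting (lower c, c) left to right answers get? k with the LAST
-- column whose lowercase is k.
theorem pv_get?_foldl_insert (cols : List String) (d : PySem.Dict String String) (k : String) :
    (cols.foldl (fun d c => d.insert (PySem.Str.lower c) c) d).get? k
      = cols.foldl (fun acc c => if PySem.Str.lower c = k then some c else acc) (d.get? k) := by
  induction cols generalizing d with
  | nil => rfl
  | cons c rest ih =>
    simp only [List.foldl_cons, ih]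
    congr 1
    rw [PySem.Dict.get?_insert]
    by_cases h : PySem.Str.lower c = k
    · simp [h]
    · simp only [if_neg h]
      rw [if_neg (fun hk => h hk.symm)]

-- B's setdefault loop answers get? k with the FIRST index of k in the lowered alias list
theorem pv_priority_get?_aux (als : List String) (s : Int) (d : PySem.Dict String Int) (k : String) :
    ((PySem.List.enumerate als s).foldl
        (fun d p => d.setdefault (PySem.Str.lower p.2) p.1) d).get? k
      = (match d.get? k with
         | some v => some v
         | none => (PySem.List.index? (als.map PySem.Str.lower) k).map (fun n => Int.ofNat n + s)) := by
  induction als generalizing s d with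
  | nil =>
    simp only [PySem.List.enumerate_nil, List.foldl_nil, List.map_nil]
    rw [(PySem.List.index?_eq_none_iff ([] : List String) k).mpr List.not_mem_nil]
    cases d.get? k <;> rfl
  | cons a rest ih =>
    simp only [PySem.List.enumerate_cons, List.foldl_cons]
    rw [ih]
    by_cases h : k = PySem.Str.lower a
    · subst h
      rw [PySem.Dict.get?_setdefault_self]
      simp only [List.map_cons, PySem.List.index?_cons_self, Option.map_some]
      cases d.get? (PySem.Str.lower a) <;> simp
    · rw [PySem.Dict.get?_setdefault_of_ne d s h]
      simp only [List.map_cons]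
      rw [PySem.List.index?_cons_of_ne (rest.map PySem.Str.lower) (fun he => h he.symm)]
      cases d.get? k with
      | some v => rfl
      | none =>
        cases PySem.List.index? (rest.map PySem.Str.lower) k with
        | none => rfl
        | some n =>
          simp only [Option.map_map, Option.map_some]
          simp only [Int.ofNat_eq_natCast]
          congr 1
          push_cast
          ring

theorem pv_priority_get? (als : List String) (k : String) :
    (pvB_priority als).get? k
      = (PySem.List.index? (als.map PySem.Str.lower) k).map Int.ofNat := by
  unfold pvB_priority
  rw [pv_priority_get?_aux]
  rw [PySem.Dict.get?_empty]
  cases PySem.List.index? (als.map PySem.Str.lower) k with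
  | none => rfl
  | some n => simp

-- B's dict fold is the reference fold transported through the Nat → Int cast on ranks
theorem pvB_fold_eq_stepNat (als : List String) (cols : List String)
    (b : Option (Nat × String)) :
    cols.foldl (pvB_step (pvB_priority als)) (b.map (fun p => ((p.1 : Int), p.2)))
      = (cols.foldl (pvB_stepNat (als.map PySem.Str.lower)) b).map (fun p => ((p.1 : Int), p.2)) := by
  induction cols generalizing b with
  | nil => rfl
  | cons c cs ih =>
    have hstep : pvB_step (pvB_priority als) (b.map (fun p => ((p.1 : Int), p.2))) c
        = (pvB_stepNat (als.map PySem.Str.lower) b c).map (fun p => ((p.1 : Int), p.2)) := by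
      unfold pvB_step pvB_stepNat
      rw [pv_priority_get?]
      cases PySem.List.index? (als.map PySem.Str.lower) (PySem.Str.lower c) with
      | none => rfl
      | some n =>
        simp only [Option.map_some]
        cases b with
        | none => rfl
        | some p =>
          simp only [Option.map_some]
          by_cases hr : n < p.1
          · rw [if_pos (by simp only [Int.ofNat_eq_natCast]; exact_mod_cast hr), if_pos hr]
            rfl
          · rw [if_neg (by simp only [Int.ofNat_eq_natCast]; exact_mod_cast hr), if_neg hr]
            rfl
    rw [List.foldl_cons, List.foldl_cons, hstep, ih]

-- once the reference fold's best has priority 0 it never changes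
theorem pvB_absorb (ts : List String) (c0 : String) (cols : List String) :
    cols.foldl (pvB_stepNat ts) (some (0, c0)) = some (0, c0) := by
  induction cols with
  | nil => rfl
  | cons c cs ih =>
    have h : pvB_stepNat ts (some (0, c0)) c = some (0, c0) := by
      unfold pvB_stepNat
      cases PySem.List.index? ts (PySem.Str.lower c) with
      | none => rfl
      | some r => simp
    rw [List.foldl_cons, h]
    exact ih

-- peeling the head target off the reference fold
theorem pvB_cons (t : String) (rest : List String) (cols : List String)
    (b : Option (Nat × String)) :
    cols.foldl (pvB_stepNat (t :: rest)) (b.map (fun p => (p.1 + 1, p.2)))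
      = match cols.find? (fun c => PySem.Str.lower c == t) with
        | some c0 => some (0, c0)
        | none => (cols.foldl (pvB_stepNat rest) b).map (fun p => (p.1 + 1, p.2)) := by
  induction cols generalizing b with
  | nil => rfl
  | cons c cs ih =>
    by_cases h : PySem.Str.lower c = t
    · have hstep : pvB_stepNat (t :: rest) (b.map (fun p => (p.1 + 1, p.2))) c = some (0, c) := by
        unfold pvB_stepNat
        rw [h, PySem.List.index?_cons_self]
        cases b with
        | none => rfl
        | some p => simp
      simp [h, List.foldl_cons, hstep, pvB_absorb]
    · have hidx : PySem.List.index? (t :: rest) (PySem.Str.lower c)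
          = (PySem.List.index? rest (PySem.Str.lower c)).map (· + 1) := by
        exact PySem.List.index?_cons_of_ne rest (Ne.symm h)
      have hstep : pvB_stepNat (t :: rest) (b.map (fun p => (p.1 + 1, p.2))) c
          = (pvB_stepNat rest b c).map (fun p => (p.1 + 1, p.2)) := by
        unfold pvB_stepNat
        rw [hidx]
        cases PySem.List.index? rest (PySem.Str.lower c) with
        | none => rfl
        | some r =>
          cases b with
          | none => rfl
          | some p =>
            simp only [Option.map_some]
            by_cases hr : r < p.1
            · simp [hr]
            · simp [hr]
      simp only [List.foldl_cons, hstep]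
      rw [ih (pvB_stepNat rest b c)]
      have hb : (PySem.Str.lower c == t) = false := by simp [h]
      simp only [List.find?_cons, hb]

-- the reference fold equals the first-match alias-order loop over the lowered alias list
theorem pvB_eq_floop (cols : List String) (ts : List String) :
    (match cols.foldl (pvB_stepNat ts) none with
     | some (_, c) => some c
     | none => none) = pvF_loop cols ts := by
  induction ts with
  | nil =>
    have h : cols.foldl (pvB_stepNat []) none = none := by
      induction cols with
      | nil => rfl
      | cons c cs ih =>
        have : pvB_stepNat [] (none : Option (Nat × String)) c = none := by
          unfold pvB_stepNat
          have : PySem.List.index? ([] : List String) (PySem.Str.lower c) = none := by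
            rw [PySem.List.index?_eq_none_iff]; simp
          rw [this]
        simp [List.foldl_cons, this, ih]
    simp [h, pvF_loop]
  | cons t rest ih =>
    have h := pvB_cons t rest cols none
    simp only [Option.map_none] at h
    rw [h]
    unfold pvF_loop
    cases hf : cols.find? (fun c => PySem.Str.lower c == t) with
    | some c0 => rfl
    | none =>
      rw [← ih]
      cases cols.foldl (pvB_stepNat rest) none with
      | none => rfl
      | some p => rfl

-- under "all columns matching k are the same string": the last match is the first match
theorem pvLastM_eq_find (cols : List String) (k : String)
    (h : List.Pairwise (fun c1 c2 => PySem.Str.lower c1 = k → PySem.Str.lower c2 = k → c1 = c2) cols) :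
    pvLastM cols k = cols.find? (fun c => PySem.Str.lower c == k) := by
  induction cols with
  | nil => rfl
  | cons c cs ih =>
    rcases List.pairwise_cons.mp h with ⟨h1, h2⟩
    by_cases hc : PySem.Str.lower c = k
    · have hstay : ∀ ds : List String, (∀ c' ∈ ds, PySem.Str.lower c' = k → c' = c) →
          ds.foldl (fun acc c => if PySem.Str.lower c = k then some c else acc) (some c) = some c := by
        intro ds
        induction ds with
        | nil => intro _; rfl
        | cons d es ihd =>
          intro hall
          by_cases hd : PySem.Str.lower d = k
          · rw [List.foldl_cons, if_pos hd, hall d List.mem_cons_self hd]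
            exact ihd (fun c' hc' => hall c' (List.mem_cons_of_mem _ hc'))
          · simp only [List.foldl_cons, if_neg hd]
            exact ihd (fun c' hc' => hall c' (List.mem_cons_of_mem _ hc'))
      have hall : ∀ c' ∈ cs, PySem.Str.lower c' = k → c' = c := fun c' hc' hk =>
        (h1 c' hc' hc hk).symm
      unfold pvLastM
      simp only [List.foldl_cons, if_pos hc]
      rw [hstay cs hall]
      simp [hc]
    · unfold pvLastM
      simp only [List.foldl_cons, if_neg hc]
      rw [List.find?_cons_of_neg (by simp [hc])]
      exact ih h2

-- A's alias loop equals the first-match loop over the lowered aliases, under Pre_'s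
-- pairwise condition
theorem pvA_eq_floop (cols : List String) (als : List String)
    (h : ∀ a ∈ als, List.Pairwise
        (fun c1 c2 => PySem.Str.lower c1 = PySem.Str.lower a → PySem.Str.lower c2 = PySem.Str.lower a → c1 = c2) cols) :
    pvA_loop (cols.foldl (fun d c => d.insert (PySem.Str.lower c) c) PySem.Dict.empty) als
      = pvF_loop cols (als.map PySem.Str.lower) := by
  induction als with
  | nil => rfl
  | cons a rest ih =>
    have hget : (cols.foldl (fun d c => d.insert (PySem.Str.lower c) c) PySem.Dict.empty).get?
        (PySem.Str.lower a) = pvLastM cols (PySem.Str.lower a) := by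
      have := pv_get?_foldl_insert cols PySem.Dict.empty (PySem.Str.lower a)
      rw [PySem.Dict.get?_empty] at this
      exact this
    unfold pvA_loop
    rw [hget, pvLastM_eq_find cols (PySem.Str.lower a) (h a List.mem_cons_self)]
    simp only [List.map_cons]
    unfold pvF_loop
    cases cols.find? (fun c => PySem.Str.lower c == PySem.Str.lower a) with
    | some v => rfl
    | none => exact ih (fun a' ha' => h a' (List.mem_cons_of_mem _ ha'))

-- ===== VERDICT (by name: the statement is the Claim_ definition above) =====
theorem resolve_column_name_py_spec : Claim_equal_resolve_column_name_py := by
  intro columns aliases description required _ hpre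
  unfold Spec_resolve_column_name_py
  have hpair : ∀ a ∈ aliases, List.Pairwise
      (fun c1 c2 => PySem.Str.lower c1 = PySem.Str.lower a → PySem.Str.lower c2 = PySem.Str.lower a → c1 = c2) columns := by
    intro a ha
    refine hpre.2.imp ?_
    intro c1 c2 hcc h1 h2
    by_contra hne
    exact hcc (h1.trans h2.symm) hne (h1 ▸ List.mem_map_of_mem ha)
  simp only [resolve_column_name_py, resolve_column_name_py_alt]
  rw [pvA_eq_floop columns aliases hpair, ← pvB_eq_floop]
  have hfold := pvB_fold_eq_stepNat aliases columns none
  simp only [Option.map_none] at hfold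
  rw [hfold]
  cases columns.foldl (pvB_stepNat (aliases.map PySem.Str.lower)) none with
  | none => rfl
  | some p => rfl
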